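-- pv_equiv track=rewrite | github.com/kkkaslikar/AY20_MBDS_questions | question_7.1.py | calc_index
-- ===== SOURCE A (Python) =====
-- def calc_index(ndim, coord):
--
--     idim = coord
--     n1 = len(idim) - 1
--     index = 0
--
--     while n1 > 0:
--         mult = idim[n1]
--         n2 = n1-1
--
--         while n2 > -1:
--             mult *= ndim[n2]
--             n2 -= 1
--
--         index += mult
--         n1 -= 1
--
--     else:
--         index += idim[n1]
--
--     return(index)
-- ===== SOURCE B (Python) =====
-- def calc_index(ndim, coord):
--     acc = coord[-1]
--     for i in range(len(coord) - 2, -1, -1):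
--         acc = acc * ndim[i] + coord[i]
--     return acc
-- ===== Notes on version B (the rewrite author's own statement) =====
-- stated objective: faster
-- what changed: Horner's rule: one reverse pass with a single multiply-accumulate instead of recomputing each stride product in a nested loop.
import Mathlib
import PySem

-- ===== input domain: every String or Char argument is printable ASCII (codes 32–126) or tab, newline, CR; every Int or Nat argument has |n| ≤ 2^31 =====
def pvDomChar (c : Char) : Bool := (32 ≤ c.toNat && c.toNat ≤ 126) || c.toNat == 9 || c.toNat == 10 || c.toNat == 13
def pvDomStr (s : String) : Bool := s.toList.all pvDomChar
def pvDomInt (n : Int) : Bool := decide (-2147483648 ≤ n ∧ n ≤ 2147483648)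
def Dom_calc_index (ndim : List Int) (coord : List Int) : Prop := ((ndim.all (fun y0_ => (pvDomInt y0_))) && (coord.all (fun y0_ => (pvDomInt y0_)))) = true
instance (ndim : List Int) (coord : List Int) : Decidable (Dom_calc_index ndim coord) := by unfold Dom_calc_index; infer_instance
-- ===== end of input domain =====

-- ===== PORT A =====
-- Header: B computes the same column-major flat index by Horner's rule in one reverse pass (faster).
-- inner while loop: n2 from k-1 down to 0, mult *= ndim[n2]; fuel k = number of remaining steps
def calcA_inner (ndim : List Int) : Int → Nat → Int
  | mult, 0 => mult
  | mult, k + 1 => calcA_inner ndim (mult * PySem.List.pyGetD ndim (Int.ofNat k) 0) k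

-- outer while loop: n1 from coord.length-1 down to 1, then the else branch adds coord[0]
def calcA_outer (ndim : List Int) (coord : List Int) : Int → Nat → Int
  | index, 0 => index + PySem.List.pyGetD coord 0 0
  | index, k + 1 =>
      calcA_outer ndim coord
        (index + calcA_inner ndim (PySem.List.pyGetD coord (Int.ofNat (k + 1)) 0) (k + 1)) k

def calc_index (ndim : List Int) (coord : List Int) : Int :=
  calcA_outer ndim coord 0 (coord.length - 1)

-- ===== PORT B =====
-- for i in range(len(coord)-2, -1, -1): acc = acc*ndim[i] + coord[i]; fuel = i+1 remaining steps
def calcB_horner (ndim : List Int) (coord : List Int) : Int → Nat → Int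
  | acc, 0 => acc
  | acc, k + 1 =>
      calcB_horner ndim coord
        (acc * PySem.List.pyGetD ndim (Int.ofNat k) 0 + PySem.List.pyGetD coord (Int.ofNat k) 0) k

def calc_index_alt (ndim : List Int) (coord : List Int) : Int :=
  calcB_horner ndim coord (PySem.List.pyGetD coord (Int.ofNat (coord.length - 1)) 0)
    (coord.length - 1)

-- ===== PRECONDITION & SPEC =====
-- Pre_ excludes exactly the inputs where the Python A raises IndexError:
-- empty coord (idim[-1]) or ndim shorter than len(coord)-1 (ndim[n2] out of range).
def Pre_calc_index (ndim : List Int) (coord : List Int) : Prop :=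
  coord ≠ [] ∧ coord.length ≤ ndim.length + 1
instance (ndim : List Int) (coord : List Int) : Decidable (Pre_calc_index ndim coord) := by
  unfold Pre_calc_index; infer_instance
def pvWitness_calc_index : List Int × List Int := ([4, 5, 6], [1, 2, 3])
def Spec_calc_index (ndim : List Int) (coord : List Int) (out : Int) : Prop := out = calc_index_alt ndim coord
instance (ndim : List Int) (coord : List Int) (out : Int) : Decidable (Spec_calc_index ndim coord out) := by unfold Spec_calc_index; infer_instance

-- ===== CLAIM (what is proved, stated in full; the proofs are below) =====
def Claim_equal_calc_index : Prop := ∀ (ndim : List Int) (coord : List Int), Dom_calc_index ndim coord → Pre_calc_index ndim coord → Spec_calc_index ndim coord (calc_index ndim coord)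

-- ===== LEMMAS AND PROOFS =====
-- prefix product of ndim: P k = ndim[0] * … * ndim[k-1]
def pvProd (ndim : List Int) : Nat → Int
  | 0 => 1
  | k + 1 => pvProd ndim k * PySem.List.pyGetD ndim (Int.ofNat k) 0

-- weighted prefix sum: S k = Σ_{i<k} coord[i] * P i
def pvSum (ndim : List Int) (coord : List Int) : Nat → Int
  | 0 => 0
  | k + 1 => pvSum ndim coord k + PySem.List.pyGetD coord (Int.ofNat k) 0 * pvProd ndim k

theorem calcA_inner_eq (ndim : List Int) (a : Int) (k : Nat) :
    calcA_inner ndim a k = a * pvProd ndim k := by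
  induction k generalizing a with
  | zero => simp [calcA_inner, pvProd]
  | succ k ih => simp [calcA_inner, pvProd, ih]; ring

theorem calcB_horner_eq (ndim coord : List Int) (a : Int) (k : Nat) :
    calcB_horner ndim coord a k = a * pvProd ndim k + pvSum ndim coord k := by
  induction k generalizing a with
  | zero => simp [calcB_horner, pvProd, pvSum]
  | succ k ih => simp [calcB_horner, pvProd, pvSum, ih]; ring

theorem calcA_outer_eq (ndim coord : List Int) (idx : Int) (k : Nat) :
    calcA_outer ndim coord idx k =
      idx + PySem.List.pyGetD coord (Int.ofNat k) 0 * pvProd ndim k + pvSum ndim coord k := by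
  induction k generalizing idx with
  | zero => simp [calcA_outer, pvProd, pvSum]
  | succ k ih => simp [calcA_outer, pvSum, ih, calcA_inner_eq]; ring

-- ===== VERDICT (by name: the statement is the Claim_ definition above) =====
theorem calc_index_spec : Claim_equal_calc_index := by
  intro ndim coord _ _
  unfold Spec_calc_index calc_index calc_index_alt
  rw [calcA_outer_eq, calcB_horner_eq]; ring
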